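-- pv_equiv track=rewrite | github.com/Oil-Limk/zConlangs | Apabara/Vocabulary/content/Naming Apabara Numbers.py | func
-- ===== SOURCE A (Python) =====
-- unes = {
--   0:"nul",
--   1:"un",
--   2:"du",
--   3:"san",
--   4:"xar",
--   5:"kin",
--   6:"xes",
--   7:"sep",
--   8:"ba",
--   9:"nin"
-- }
--
-- des_powa = {
--   0:"mil",
--   1:"des",
--   2:"xen"
-- }
--
-- def func(num:int)->str:
--   if num == 0:
--     return "nul"
--   else:
--     s = ""
--     n = 0
--     while 0 < num:
--       if n > 0:
--         if n % 6:
--           pass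
--       s = unes[num % 10] + des_powa[n % 3] + " " + s
--       n += 1
--       num //= 10
--   return s
-- ===== SOURCE B (Python) =====
-- unes = {
--   0:"nul", 1:"un", 2:"du", 3:"san", 4:"xar",
--   5:"kin", 6:"xes", 7:"sep", 8:"ba", 9:"nin"
-- }
--
-- des_powa = {0:"mil", 1:"des", 2:"xen"}
--
-- def func(num: int) -> str:
--   if num == 0:
--     return "nul"
--   ds = []
--   while num > 0:
--     ds.append(num % 10)
--     num //= 10
--   return "".join(unes[d] + des_powa[i % 3] + " "
--                  for i, d in reversed(list(enumerate(ds))))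
-- ===== Notes on version B (the rewrite author's own statement) =====
-- stated objective: alternative
-- what changed: Replaces A's single interleaved while loop that prepends each spelled chunk to a string accumulator with two staged passes: first extract the digit list (LSB-first), then render it in one join over the reversed enumeration, with no string accumulator and no prepending.
import Mathlib
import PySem

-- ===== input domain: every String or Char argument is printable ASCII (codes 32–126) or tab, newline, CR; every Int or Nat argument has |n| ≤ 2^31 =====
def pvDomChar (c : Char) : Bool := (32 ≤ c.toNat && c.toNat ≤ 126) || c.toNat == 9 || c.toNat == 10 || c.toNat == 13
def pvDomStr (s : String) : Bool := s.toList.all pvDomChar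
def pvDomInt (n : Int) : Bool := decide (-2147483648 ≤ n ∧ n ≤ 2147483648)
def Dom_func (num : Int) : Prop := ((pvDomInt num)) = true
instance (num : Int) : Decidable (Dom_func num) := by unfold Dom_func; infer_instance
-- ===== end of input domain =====

-- B replaces A's accumulator-prepending while loop by two staged passes: extract the digit
-- list, then render it with one join over the reversed enumeration (objective: alternative).

-- ===== PORT A =====
-- module constants: the two digit/power dicts (lookups hit keys 0..9 resp. 0..2, so the "" default of getD is never used)
def unes : PySem.Dict Int String :=
  PySem.Dict.ofList [(0,"nul"),(1,"un"),(2,"du"),(3,"san"),(4,"xar"),(5,"kin"),(6,"xes"),(7,"sep"),(8,"ba"),(9,"nin")]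

def des_powa : PySem.Dict Int String := PySem.Dict.ofList [(0,"mil"),(1,"des"),(2,"xen")]

-- A's while loop: state (num, n, s); s = unes[num%10] + des_powa[n%3] + " " + s each round
def funcLoop (num n : Int) (s : String) : String :=
  if 0 < num then
    funcLoop (PySem.Int.floordiv num 10) (n + 1)
      (PySem.Dict.getD unes (PySem.Int.mod num 10) "" ++
       PySem.Dict.getD des_powa (PySem.Int.mod n 3) "" ++ " " ++ s)
  else s
termination_by num.toNat
decreasing_by
  rw [PySem.Int.floordiv_eq_ediv_of_pos (by norm_num : (0:Int) < 10)]
  omega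

def func (num : Int) : String :=
  if num = 0 then "nul" else funcLoop num 0 ""

-- ===== PORT B =====
-- B's first pass: the while loop collecting num % 10 into ds (LSB-first)
def digitsB (num : Int) : List Int :=
  if 0 < num then PySem.Int.mod num 10 :: digitsB (PySem.Int.floordiv num 10) else []
termination_by num.toNat
decreasing_by
  rw [PySem.Int.floordiv_eq_ediv_of_pos (by norm_num : (0:Int) < 10)]
  omega

-- B's second pass: "".join(... for i, d in reversed(list(enumerate(ds))))
def func_alt (num : Int) : String :=
  if num = 0 then "nul"
  else
    String.join (((PySem.List.enumerate (digitsB num) 0).reverse).map (fun p =>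
      PySem.Dict.getD unes p.2 "" ++ PySem.Dict.getD des_powa (PySem.Int.mod p.1 3) "" ++ " "))

-- ===== PRECONDITION & SPEC =====
def Spec_func (num : Int) (out : String) : Prop := out = func_alt num
instance (num : Int) (out : String) : Decidable (Spec_func num out) := by unfold Spec_func; infer_instance

-- ===== CLAIM (what is proved, stated in full; the proofs are below) =====
def Claim_equal_func : Prop := ∀ (num : Int), Dom_func num → Spec_func num (func num)

-- ===== LEMMAS AND PROOFS =====

-- "".join of a snoc: String.join (L ++ [x]) = String.join L ++ x
theorem join_concat (L : List String) (x : String) :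
    String.join (L ++ [x]) = String.join L ++ x := by
  simp [String.join, List.foldl_append]

-- A's loop equals B's render of the digit list, for any start index n and tail s
theorem funcLoop_eq_render (num : Int) : ∀ (n : Int) (s : String),
    funcLoop num n s =
      String.join (((PySem.List.enumerate (digitsB num) n).reverse).map (fun p =>
        PySem.Dict.getD unes p.2 "" ++ PySem.Dict.getD des_powa (PySem.Int.mod p.1 3) "" ++ " ")) ++ s := by
  intro n s
  rw [funcLoop, digitsB]
  split_ifs with h
  · rw [funcLoop_eq_render (PySem.Int.floordiv num 10) (n + 1)]
    rw [PySem.List.enumerate_cons, List.reverse_cons, List.map_append, List.map_singleton, join_concat]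
    simp [String.append_assoc]
  · simp [PySem.List.enumerate_nil, String.join]
termination_by num.toNat
decreasing_by
  rw [PySem.Int.floordiv_eq_ediv_of_pos (by norm_num : (0:Int) < 10)]
  omega

-- ===== VERDICT (by name: the statement is the Claim_ definition above) =====
theorem func_spec : Claim_equal_func := by
  intro num _
  unfold Spec_func func func_alt
  by_cases h : num = 0
  · simp [h]
  · simp [h, funcLoop_eq_render]
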